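-- pv_equiv track=rewrite | github.com/Jorgeamayapabon/estate-api | merge_sort.py | procesar_arreglo
-- ===== SOURCE A (Python) =====
-- def mergesort(lista):
--     if len(lista) == 0:
--         return lista
--     elif len(lista) == 1:
--         return [str(lista[0])]
--
--     medio = len(lista) // 2
--     izquierda = mergesort(lista[:medio])
--     derecha = mergesort(lista[medio:])
--
--     return merge(izquierda, derecha)
--
-- def merge(izq, der):
--     resultado = []
--     i = j = 0
--
--     while i < len(izq) and j < len(der):
--         if izq[i] < der[j]:
--             resultado.append(str(izq[i]))
--             i += 1
--         else:
--             resultado.append(str(der[j]))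
--             j += 1
--
--     resultado.extend(izq[i:])
--     resultado.extend(der[j:])
--     return resultado
--
-- def procesar_arreglo(arr):
--     bloques = []
--     actual = []
--
--     for num in arr:
--         if num == 0:
--             bloques.append(actual)
--             actual = []
--         else:
--             actual.append(num)
--
--     # último bloque
--     bloques.append(actual)
--
--     resultado = []
--
--     for bloque in bloques:
--         if not bloque:
--             resultado.append("X")
--         else:
--             ordenado = mergesort(bloque)
--             resultado.append("".join(ordenado))
--
--     return " ".join(resultado)
-- ===== SOURCE B (Python) =====
-- def procesar_arreglo(arr):
--     parts = []
--     bloque = []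
--     for num in arr:
--         if num == 0:
--             parts.append("".join(sorted(bloque)) or "X")
--             bloque = []
--         else:
--             bloque.append(str(num))
--     parts.append("".join(sorted(bloque)) or "X")
--     return " ".join(parts)
-- ===== Notes on version B (the rewrite author's own statement) =====
-- stated objective: idiomatic
-- what changed: Replaces the recursive mergesort/merge helpers and the intermediate list-of-blocks pass by a single loop that stringifies elements as it reads them and emits each block with the built-in sort ('"".join(sorted(bloque)) or "X"').
import Mathlib
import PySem

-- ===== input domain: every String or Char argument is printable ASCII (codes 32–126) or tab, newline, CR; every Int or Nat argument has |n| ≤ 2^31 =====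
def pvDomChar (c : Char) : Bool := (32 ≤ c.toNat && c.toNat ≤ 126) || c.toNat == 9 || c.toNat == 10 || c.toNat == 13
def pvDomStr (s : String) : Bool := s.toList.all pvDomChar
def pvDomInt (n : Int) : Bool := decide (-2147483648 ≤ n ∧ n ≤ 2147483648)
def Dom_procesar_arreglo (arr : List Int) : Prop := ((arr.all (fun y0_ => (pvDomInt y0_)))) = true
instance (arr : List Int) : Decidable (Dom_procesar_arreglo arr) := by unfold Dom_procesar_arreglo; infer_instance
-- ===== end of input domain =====

-- B replaces A's hand-rolled mergesort/merge helpers and the intermediate list of blocks by a single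
-- pass that stringifies as it goes and emits each block with the built-in sort ("or \"X\"" for the
-- empty block); objective: idiomatic, same asymptotics, measured constant-factor speedup.

-- ===== PORT A =====
-- merge(izq, der): the index-based while loop plus the two extends, as head recursion over the same data
def pyMerge : List String → List String → List String
  | [], der => der
  | izq, [] => izq
  | a :: izq, b :: der =>
    if a < b then a :: pyMerge izq (b :: der)
    else b :: pyMerge (a :: izq) der

-- mergesort(lista): len-0 / len-1 base cases, split at len//2, recurse, merge
def pyMergesort (lista : List Int) : List String :=
  if lista.length = 0 then []
  else if lista.length = 1 then [PySem.Int.toStr lista.headI]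
  else
    pyMerge (pyMergesort (lista.take (lista.length / 2)))
            (pyMergesort (lista.drop (lista.length / 2)))
termination_by lista.length
decreasing_by
  · rename_i h0 h1
    rw [List.length_take]
    exact Nat.lt_of_le_of_lt (Nat.min_le_left _ _)
      (Nat.div_lt_self (Nat.pos_of_ne_zero h0) Nat.one_lt_two)
  · rename_i h0 h1
    rw [List.length_drop]
    exact Nat.sub_lt (Nat.pos_of_ne_zero h0)
      (Nat.div_pos (Nat.lt_of_le_of_ne (Nat.one_le_iff_ne_zero.mpr h0) (fun he => h1 he.symm)) (Nat.succ_pos 1))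

def procesar_arreglo (arr : List Int) : String :=
  -- first loop: cut arr into bloques on zeros, keeping the running block 'actual'
  let st := arr.foldl
    (fun (st : List (List Int) × List Int) num =>
      if num = 0 then (st.1 ++ [st.2], ([] : List Int)) else (st.1, st.2 ++ [num]))
    ([], [])
  let bloques := st.1 ++ [st.2]
  -- second loop: "X" for an empty block, "".join(mergesort(bloque)) otherwise
  let resultado := bloques.foldl
    (fun res bloque =>
      if bloque = [] then res ++ ["X"]
      else res ++ [PySem.Str.join "" (pyMergesort bloque)])
    []
  PySem.Str.join " " resultado

-- ===== PORT B =====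
-- '"".join(sorted(bloque)) or "X"' on an already-stringified block
def emitB (bloque : List String) : String :=
  let s := PySem.Str.join "" (PySem.List.sorted bloque (fun x => x))
  if s = "" then "X" else s

def procesar_arreglo_alt (arr : List Int) : String :=
  let st := arr.foldl
    (fun (st : List String × List String) num =>
      if num = 0 then (st.1 ++ [emitB st.2], ([] : List String))
      else (st.1, st.2 ++ [PySem.Int.toStr num]))
    ([], [])
  PySem.Str.join " " (st.1 ++ [emitB st.2])

-- ===== PRECONDITION & SPEC =====
def Spec_procesar_arreglo (arr : List Int) (out : String) : Prop := out = procesar_arreglo_alt arr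
instance (arr : List Int) (out : String) : Decidable (Spec_procesar_arreglo arr out) := by unfold Spec_procesar_arreglo; infer_instance

-- ===== CLAIM (what is proved, stated in full; the proofs are below) =====
def Claim_equal_procesar_arreglo : Prop := ∀ (arr : List Int), Dom_procesar_arreglo arr → Spec_procesar_arreglo arr (procesar_arreglo arr)

-- ===== LEMMAS AND PROOFS =====

-- A's rendering of one block, as a function of the original Int block
def renderA (b : List Int) : String :=
  if b = [] then "X" else PySem.Str.join "" (pyMergesort b)

lemma pyMerge_perm (xs ys : List String) : (pyMerge xs ys).Perm (xs ++ ys) := by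
  fun_induction pyMerge xs ys with
  | case1 der => simp
  | case2 izq h => simp
  | case3 a izq b der h ih => simpa using ih.cons a
  | case4 a izq b der h ih => exact (ih.cons b).trans List.perm_middle.symm

lemma pyMerge_pairwise (xs ys : List String)
    (hx : xs.Pairwise (· ≤ ·)) (hy : ys.Pairwise (· ≤ ·)) :
    (pyMerge xs ys).Pairwise (· ≤ ·) := by
  fun_induction pyMerge xs ys with
  | case1 der => exact hy
  | case2 izq h => exact hx
  | case3 a izq b der h ih =>
    rw [List.pairwise_cons]
    refine ⟨?_, ih hx.tail hy⟩
    intro z hz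
    rcases List.mem_append.mp ((pyMerge_perm izq (b :: der)).mem_iff.mp hz) with hz' | hz'
    · exact (List.pairwise_cons.mp hx).1 z hz'
    · rcases List.mem_cons.mp hz' with rfl | hz''
      · exact le_of_lt h
      · exact (le_of_lt h).trans ((List.pairwise_cons.mp hy).1 z hz'')
  | case4 a izq b der h ih =>
    rw [List.pairwise_cons]
    refine ⟨?_, ih hx hy.tail⟩
    intro z hz
    have hb : b ≤ a := not_lt.mp h
    rcases List.mem_append.mp ((pyMerge_perm (a :: izq) der).mem_iff.mp hz) with hz' | hz'
    · rcases List.mem_cons.mp hz' with rfl | hz''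
      · exact hb
      · exact hb.trans ((List.pairwise_cons.mp hx).1 z hz'')
    · exact (List.pairwise_cons.mp hy).1 z hz'

lemma pyMergesort_perm (l : List Int) : (pyMergesort l).Perm (l.map PySem.Int.toStr) := by
  fun_induction pyMergesort l with
  | case1 l h =>
    have h' : l = [] := List.length_eq_zero_iff.mp h
    subst h'; simp
  | case2 l h0 h1 =>
    obtain ⟨x, rfl⟩ := List.length_eq_one_iff.mp h1
    simp [List.headI]
  | case3 l h0 h1 ih1 ih2 =>
    refine (pyMerge_perm _ _).trans ?_
    have hp := ih1.append ih2
    rwa [← List.map_append, List.take_append_drop] at hp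

lemma pyMergesort_pairwise (l : List Int) : (pyMergesort l).Pairwise (· ≤ ·) := by
  fun_induction pyMergesort l with
  | case1 l h => simp
  | case2 l h0 h1 => simp
  | case3 l h0 h1 ih1 ih2 => exact pyMerge_pairwise _ _ ih1 ih2

lemma pyMergesort_eq_sorted (l : List Int) :
    pyMergesort l = PySem.List.sorted (l.map PySem.Int.toStr) (fun x => x) := by
  exact (PySem.List.sorted_id_eq_of_perm_of_pairwise _ _ (pyMergesort_perm l)
    (pyMergesort_pairwise l)).symm

lemma toDigitsCore_len (f : Nat) : ∀ (n : Nat) (acc : List Char),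
    acc.length ≤ (Nat.toDigitsCore 10 f n acc).length := by
  induction f with
  | zero => intro n acc; simp [Nat.toDigitsCore]
  | succ f ih =>
    intro n acc
    rw [Nat.toDigitsCore]
    split
    · simp
    · exact le_trans (by simp) (ih (n / 10) _)

lemma toChars_ne_nil (n : Int) : PySem.Int.toChars n ≠ [] := by
  have hd : ∀ m : Nat, Nat.toDigits 10 m ≠ [] := by
    intro m hm
    have h1 := toDigitsCore_len m (m / 10) [(m % 10).digitChar]
    unfold Nat.toDigits at hm
    rw [Nat.toDigitsCore] at hm
    split at hm
    · simp at hm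
    · rw [hm] at h1; simp at h1
  unfold PySem.Int.toChars
  split
  · simp
  · exact hd _

lemma join_nil_sep (parts : List (List Char)) : PySem.Chars.join [] parts = parts.flatten := by
  show List.intercalate [] parts = parts.flatten
  rw [List.intercalate]
  induction parts with
  | nil => rfl
  | cons h t ih => cases t <;> simp_all

lemma join_empty_ne (s : String) (rest : List String) (hs : s.toList ≠ []) :
    PySem.Str.join "" (s :: rest) ≠ "" := by
  intro h
  have h2 := congrArg String.toList h
  rw [PySem.Str.toList_join] at h2
  simp only [String.toList_empty] at h2
  rw [join_nil_sep] at h2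
  simp at h2
  exact hs (by simp [h2.1])

lemma emitB_map (b : List Int) : emitB (b.map PySem.Int.toStr) = renderA b := by
  unfold emitB renderA
  rw [← pyMergesort_eq_sorted]
  by_cases hb : b = []
  · subst hb
    simp [pyMergesort, PySem.Str.join, PySem.Chars.join, List.intercalate]
  · rw [if_neg hb]
    have hne : pyMergesort b ≠ [] := by
      intro h
      have := pyMergesort_perm b
      rw [h] at this
      have hlen := this.length_eq
      simp at hlen
      exact hb (List.length_eq_zero_iff.mp hlen.symm)
    obtain ⟨s, rest, hsr⟩ := List.exists_cons_of_ne_nil hne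
    have hsmem : s ∈ pyMergesort b := by rw [hsr]; exact List.mem_cons_self
    have hsin : s ∈ b.map PySem.Int.toStr := (pyMergesort_perm b).mem_iff.mp hsmem
    obtain ⟨x, _, rfl⟩ := List.mem_map.mp hsin
    have hslist : (PySem.Int.toStr x).toList ≠ [] := by
      rw [PySem.Int.toList_toStr]; exact toChars_ne_nil x
    rw [hsr]
    rw [if_neg (join_empty_ne _ rest hslist)]

lemma foldA_eq_map (bloques : List (List Int)) (acc : List String) :
    bloques.foldl
      (fun res bloque =>
        if bloque = [] then res ++ ["X"]
        else res ++ [PySem.Str.join "" (pyMergesort bloque)]) acc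
    = acc ++ bloques.map renderA := by
  induction bloques generalizing acc with
  | nil => simp
  | cons b t ih =>
    simp only [List.foldl_cons, List.map_cons]
    by_cases hb : b = []
    · rw [if_pos hb, ih]; simp [renderA, hb]
    · rw [if_neg hb, ih]; simp [renderA, hb]

lemma fold_inv (arr : List Int) (bs : List (List Int)) (cur : List Int) :
    arr.foldl
      (fun (st : List String × List String) num =>
        if num = 0 then (st.1 ++ [emitB st.2], ([] : List String))
        else (st.1, st.2 ++ [PySem.Int.toStr num]))
      (bs.map renderA, cur.map PySem.Int.toStr)
    = ((arr.foldl
        (fun (st : List (List Int) × List Int) num =>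
          if num = 0 then (st.1 ++ [st.2], ([] : List Int)) else (st.1, st.2 ++ [num]))
        (bs, cur)).1.map renderA,
       (arr.foldl
        (fun (st : List (List Int) × List Int) num =>
          if num = 0 then (st.1 ++ [st.2], ([] : List Int)) else (st.1, st.2 ++ [num]))
        (bs, cur)).2.map PySem.Int.toStr) := by
  induction arr generalizing bs cur with
  | nil => rfl
  | cons n rest ih =>
    simp only [List.foldl_cons]
    by_cases hn : n = 0
    · rw [if_pos hn, if_pos hn]
      have h1 : bs.map renderA ++ [emitB (cur.map PySem.Int.toStr)]
          = (bs ++ [cur]).map renderA := by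
        rw [emitB_map]; simp
      rw [h1]
      exact ih (bs ++ [cur]) []
    · rw [if_neg hn, if_neg hn]
      have h1 : cur.map PySem.Int.toStr ++ [PySem.Int.toStr n]
          = (cur ++ [n]).map PySem.Int.toStr := by simp
      rw [h1]
      exact ih bs (cur ++ [n])

-- ===== VERDICT (by name: the statement is the Claim_ definition above) =====
theorem procesar_arreglo_spec : Claim_equal_procesar_arreglo := by
  intro arr _
  show procesar_arreglo arr = procesar_arreglo_alt arr
  unfold procesar_arreglo procesar_arreglo_alt
  dsimp only
  have h := fold_inv arr [] []
  simp only [List.map_nil] at h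
  rw [h, foldA_eq_map, emitB_map]
  simp
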